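-- pv_equiv track=rewrite | github.com/donmeyer/membership-card | mcard.py | dataToHexStrings
-- ===== SOURCE A (Python) =====
-- def dataToHexStrings(data):
--     buf = ""
--     bytes = 0
--     for b in data:
--         buf = buf + "%02X" % b
--         bytes += 1
--         if bytes >= 16:
--             buf += "\n"
--             bytes = 0
--
--     return buf
-- ===== SOURCE B (Python) =====
-- def dataToHexStrings(data):
--     parts = []
--     i = 0
--     while i < len(data):
--         chunk = data[i:i+16]
--         parts.append(''.join('%02X' % b for b in chunk))
--         if len(chunk) == 16:
--             parts.append('\n')
--         i += 16
--     return ''.join(parts)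
-- ===== Notes on version B (the rewrite author's own statement) =====
-- stated objective: simpler
-- what changed: Replaces A's flat byte-by-byte pass with a running string and a reset-at-16 counter by a chunked traversal: each 16-byte slice is hex-formatted into one part (newline part appended exactly after a full chunk) and the parts are joined once at the end.
import Mathlib
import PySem

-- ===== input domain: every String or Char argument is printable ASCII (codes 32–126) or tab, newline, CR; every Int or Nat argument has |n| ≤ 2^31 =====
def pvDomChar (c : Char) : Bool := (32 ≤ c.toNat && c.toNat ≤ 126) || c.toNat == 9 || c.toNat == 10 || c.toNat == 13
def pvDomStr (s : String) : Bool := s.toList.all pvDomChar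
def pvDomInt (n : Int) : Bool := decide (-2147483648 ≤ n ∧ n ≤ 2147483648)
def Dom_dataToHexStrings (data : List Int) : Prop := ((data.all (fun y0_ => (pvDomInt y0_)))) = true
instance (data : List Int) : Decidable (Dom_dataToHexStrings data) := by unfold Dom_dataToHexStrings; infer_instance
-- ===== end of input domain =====

-- B replaces A's flat counter-driven pass (running string concatenation) by a chunked
-- traversal: 16-byte slices formatted per chunk into parts joined once (objective: simpler).


-- ===== PORT A =====
-- shared helper: Python's '%X' digit string of a nonnegative number, most significant first
def hexDigit (n : Nat) : Char :=
  if n < 10 then Char.ofNat (48 + n) else Char.ofNat (55 + n)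

def hexChars (n : Nat) : List Char :=
  if _h : n < 16 then [hexDigit n]
  else hexChars (n / 16) ++ [hexDigit (n % 16)]
decreasing_by exact Nat.div_lt_self (by omega) (by omega)

-- shared helper: the expression "%02X" % b (sign first, zero-padded to total width 2)
def fmt02X (b : Int) : String :=
  let s := if b < 0 then '-' :: hexChars b.natAbs else hexChars b.toNat
  String.mk (if s.length < 2 then '0' :: s else s)

-- the body of A's for-loop, on the state (buf, bytes)
def stepA (st : String × Int) (b : Int) : String × Int :=
  let buf := st.1 ++ fmt02X b
  let bytes := st.2 + 1
  if bytes ≥ 16 then (buf ++ "\n", 0) else (buf, bytes)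

def dataToHexStrings (data : List Int) : String :=
  (data.foldl stepA ("", (0 : Int))).1

-- ===== PORT B =====
-- B's while-loop: walk an index i over data in steps of 16, appending to parts
def altGo (data : List Int) (i : Nat) (parts : List String) : List String :=
  if _h : (i : Int) < (data.length : Int) then
    let chunk := PySem.List.slice data (some (i : Int)) (some ((i : Int) + 16))
    let parts1 := parts ++ [String.join (chunk.map fmt02X)]
    let parts2 := if chunk.length = 16 then parts1 ++ ["\n"] else parts1
    altGo data (i + 16) parts2
  else parts
termination_by data.length - i
decreasing_by omega

def dataToHexStrings_alt (data : List Int) : String :=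
  String.join (altGo data 0 [])

-- ===== PRECONDITION & SPEC =====
def Spec_dataToHexStrings (data : List Int) (out : String) : Prop := out = dataToHexStrings_alt data
instance (data : List Int) (out : String) : Decidable (Spec_dataToHexStrings data out) := by unfold Spec_dataToHexStrings; infer_instance

-- ===== CLAIM (what is proved, stated in full; the proofs are below) =====
def Claim_equal_dataToHexStrings : Prop := ∀ (data : List Int), Dom_dataToHexStrings data → Spec_dataToHexStrings data (dataToHexStrings data)

-- ===== LEMMAS AND PROOFS =====

def joinmap (l : List Int) : String := String.join (l.map fmt02X)

theorem join_foldl_shift (l : List String) : ∀ (a : String),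
    l.foldl (· ++ ·) a = a ++ l.foldl (· ++ ·) "" := by
  induction l with
  | nil => intro a; simp
  | cons h t ih =>
    intro a
    simp only [List.foldl_cons]
    rw [ih (a ++ h), ih ("" ++ h)]
    simp [String.append_assoc]

theorem join_cons (s : String) (l : List String) :
    String.join (s :: l) = s ++ String.join l := by
  simp only [String.join, List.foldl_cons]
  rw [join_foldl_shift]
  simp

theorem join_append (a b : List String) :
    String.join (a ++ b) = String.join a ++ String.join b := by
  induction a with
  | nil => simp [String.join]
  | cons h t ih => simp only [List.cons_append, join_cons, ih, String.append_assoc]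

theorem slice16_at (l : List Int) (i : Nat) :
    PySem.List.slice l (some (i : Int)) (some ((i : Int) + 16)) = (l.drop i).take 16 := by
  have := PySem.List.slice_natCast_add (xs := l) (j := i) (n := 16)
  simpa using this

theorem altGo_nil_of_le (data : List Int) (i : Nat) (parts : List String)
    (h : data.length ≤ i) : altGo data i parts = parts := by
  rw [altGo]
  rw [dif_neg (by push_cast; omega)]

theorem altGo_shift (n : Nat) : ∀ (data : List Int) (i : Nat) (parts : List String),
    data.length - i ≤ n → altGo data (i + 16) parts = altGo (data.drop 16) i parts := by
  induction n with
  | zero =>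
    intro data i parts hle
    rw [altGo_nil_of_le _ _ _ (by omega),
        altGo_nil_of_le _ _ _ (by simp only [List.length_drop]; omega)]
  | succ n ih =>
    intro data i parts hle
    by_cases h : ((i : Int) + 16 : Int) < (data.length : Int)
    · conv_lhs => rw [altGo]
      conv_rhs => rw [altGo]
      rw [dif_pos (by push_cast; omega), dif_pos (by simp only [List.length_drop]; push_cast; omega)]
      have hchunk : PySem.List.slice data (some ((i + 16 : Nat) : Int)) (some (((i + 16 : Nat) : Int) + 16)) =
          PySem.List.slice (data.drop 16) (some (i : Int)) (some ((i : Int) + 16)) := by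
        rw [slice16_at, slice16_at, List.drop_drop]
        simp [Nat.add_comm]
      rw [hchunk]
      exact ih data (i + 16) _ (by omega)
    · rw [altGo_nil_of_le _ _ _ (by omega),
          altGo_nil_of_le _ _ _ (by simp only [List.length_drop]; omega)]

-- the accumulator of altGo factors out
theorem altGo_acc (n : Nat) : ∀ (data : List Int) (i : Nat), data.length - i ≤ n →
    ∀ parts, altGo data i parts = parts ++ altGo data i [] := by
  induction n with
  | zero =>
    intro data i hle parts
    rw [altGo_nil_of_le _ _ _ (by omega), altGo_nil_of_le _ _ _ (by omega)]
    simp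
  | succ n ih =>
    intro data i hle parts
    by_cases h : (i : Int) < (data.length : Int)
    · conv_lhs => rw [altGo]
      conv_rhs => rw [altGo]
      rw [dif_pos h, dif_pos h]
      have hlen : data.length - (i + 16) ≤ n := by omega
      by_cases hc : (PySem.List.slice data (some (i : Int)) (some ((i : Int) + 16))).length = 16
      · simp only [hc, ite_true, List.nil_append]
        rw [ih _ _ hlen]
        conv_rhs => rw [ih _ _ hlen]
        simp
      · simp only [hc, ite_false, List.nil_append]
        rw [ih _ _ hlen]
        conv_rhs => rw [ih _ _ hlen]
        simp
    · rw [altGo_nil_of_le _ _ _ (by omega), altGo_nil_of_le _ _ _ (by omega)]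
      simp

-- one step of B: take 16, emit the line (plus newline iff full), recurse on the rest
theorem alt_step (l : List Int) (h : l ≠ []) :
    dataToHexStrings_alt l =
      joinmap (l.take 16) ++
        (if (l.take 16).length = 16 then "\n" ++ dataToHexStrings_alt (l.drop 16) else "") := by
  unfold dataToHexStrings_alt
  conv_lhs => rw [altGo]
  have hpos : ((0 : Nat) : Int) < (l.length : Int) := by
    have := List.length_pos_of_ne_nil h
    push_cast
    omega
  rw [dif_pos hpos]
  simp only [slice16_at, List.drop_zero, List.nil_append]
  rw [show altGo l (0 + 16) = altGo (l.drop 16) 0 from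
        funext fun p => altGo_shift l.length l 0 p (by omega)]
  rw [show ∀ p, altGo (l.drop 16) 0 p = p ++ altGo (l.drop 16) 0 [] from
        fun p => altGo_acc (l.drop 16).length (l.drop 16) 0 (by omega) p]
  by_cases hc : (l.take 16).length = 16
  · simp only [hc, ite_true]
    rw [join_append]
    simp only [List.cons_append, List.nil_append]
    rw [join_cons, join_cons]
    simp [joinmap, String.join, String.append_assoc]
  · simp only [hc, ite_false]
    have hd : l.drop 16 = [] := by
      rw [List.length_take] at hc
      exact List.drop_eq_nil_of_le (by omega)
    rw [hd, altGo_nil_of_le _ _ _ (by simp)]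
    rw [join_append, join_cons]
    simp [joinmap, String.join]

-- the buffer of A's fold factors out
theorem foldl_shift (l : List Int) : ∀ (buf : String) (c : Int),
    List.foldl stepA (buf, c) l =
      (buf ++ (List.foldl stepA ("", c) l).1, (List.foldl stepA ("", c) l).2) := by
  induction l with
  | nil => intro buf c; simp
  | cons x t ih =>
    intro buf c
    simp only [List.foldl_cons, stepA]
    split_ifs with hc
    · rw [ih (buf ++ fmt02X x ++ "\n") 0, ih ("" ++ fmt02X x ++ "\n") 0]
      simp [String.append_assoc]
    · rw [ih (buf ++ fmt02X x) (c + 1), ih ("" ++ fmt02X x) (c + 1)]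
      simp [String.append_assoc]

theorem foldl_small (l : List Int) : ∀ (buf : String) (c : Int), 0 ≤ c →
    c + l.length ≤ 15 →
    List.foldl stepA (buf, c) l = (buf ++ joinmap l, c + l.length) := by
  induction l with
  | nil => intro buf c _ _; simp [joinmap, String.join]
  | cons x t ih =>
    intro buf c hc hlen
    simp only [List.length_cons] at hlen
    push_cast at hlen
    simp only [List.foldl_cons, stepA]
    rw [if_neg (by omega)]
    rw [ih (buf ++ fmt02X x) (c + 1) (by omega) (by push_cast; omega)]
    simp only [Prod.mk.injEq]
    refine ⟨?_, by simp only [List.length_cons]; push_cast; ring⟩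
    simp only [joinmap, List.map_cons]
    rw [join_cons, String.append_assoc]

theorem foldl_full (l : List Int) (buf : String) (h : l.length = 16) :
    List.foldl stepA (buf, 0) l = (buf ++ joinmap l ++ "\n", 0) := by
  have hne : l ≠ [] := by intro e; rw [e] at h; simp at h
  have hdl := List.dropLast_concat_getLast hne
  rw [← hdl, List.foldl_append]
  have hdlen : l.dropLast.length = 15 := by
    rw [List.length_dropLast, h]
  rw [foldl_small l.dropLast buf 0 le_rfl (by rw [hdlen]; norm_num)]
  simp only [List.foldl_cons, List.foldl_nil, stepA, hdlen]
  rw [if_pos (by norm_num)]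
  simp only [Prod.mk.injEq, and_true]
  simp only [joinmap, List.map_append, List.map_cons, List.map_nil]
  rw [join_append, join_cons]
  simp [String.join, String.append_assoc]

theorem main_eq (n : Nat) : ∀ (l : List Int), l.length ≤ n →
    (List.foldl stepA ("", (0:Int)) l).1 = dataToHexStrings_alt l := by
  induction n with
  | zero =>
    intro l hle
    have : l = [] := List.eq_nil_of_length_eq_zero (Nat.le_zero.mp hle)
    subst this
    simp [dataToHexStrings_alt, altGo, String.join]
  | succ n ih =>
    intro l hle
    by_cases hnil : l = []
    · subst hnil; simp [dataToHexStrings_alt, altGo, String.join]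
    · by_cases h16 : 16 ≤ l.length
      · have htake : (l.take 16).length = 16 := by
          rw [List.length_take]; omega
        have hdrop : (l.drop 16).length ≤ n := by
          rw [List.length_drop]
          have : 0 < l.length := List.length_pos_of_ne_nil hnil
          omega
        conv_lhs => rw [← List.take_append_drop 16 l]
        rw [List.foldl_append, foldl_full _ _ htake, foldl_shift]
        rw [alt_step l hnil, if_pos htake]
        rw [ih _ hdrop]
        simp [String.append_assoc]
      · have hlt : l.length < 16 := by omega
        rw [foldl_small l "" 0 le_rfl (by push_cast; omega)]
        rw [alt_step l hnil]
        rw [if_neg (by rw [List.length_take]; omega)]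
        rw [List.take_of_length_le (by omega)]
        simp

-- ===== VERDICT (by name: the statement is the Claim_ definition above) =====
theorem dataToHexStrings_spec : Claim_equal_dataToHexStrings := by
  intro data _
  unfold Spec_dataToHexStrings dataToHexStrings
  exact main_eq data.length data le_rfl
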